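-- pv_equiv track=rewrite | github.com/99cardz/sudokuSolve | sudoku.py | get_conflicting
-- ===== SOURCE A (Python) =====
-- positions = [i for i in range(81)]
--
-- def get_conflicting(pos):
--
--     vertical = positions[pos % 9 :: 9] # vertical
--
--     horizontal = positions[pos // 9 * 9 : pos // 9 * 9 + 9] # horizontal
--
--     for chunk_start in [0,3,6,27,30,33,54,57,60]:
--         chunk_positions = positions[chunk_start:chunk_start+3] + positions[chunk_start+9:chunk_start+12] + positions[chunk_start+18:chunk_start+21]
--         if pos in chunk_positions:
--             chunk = chunk_positions # 3x3 chunk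
--             break
--
--     # clean
--     vertical.remove(pos)
--     horizontal.remove(pos)
--     chunk.remove(pos)
--
--     return {'v': vertical, 'h': horizontal, 'c': chunk}
-- ===== SOURCE B (Python) =====
-- def get_conflicting(pos):
--     row, col = divmod(pos, 9)
--     box = pos // 27 * 27 + col // 3 * 3
--     vertical = [i for i in range(col, 81, 9) if i != pos]
--     horizontal = [i for i in range(row * 9, row * 9 + 9) if i != pos]
--     chunk = [box + 9 * r + c for r in range(3) for c in range(3) if box + 9 * r + c != pos]
--     return {'v': vertical, 'h': horizontal, 'c': chunk}
-- ===== Notes on version B (the rewrite author's own statement) =====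
-- stated objective: simpler
-- what changed: B computes the 3x3 box origin by closed-form arithmetic (pos//27*27 + pos%9//3*3) and builds all three lists as filtered range comprehensions, replacing A's scan over nine candidate box starts with slicing/concatenation/membership and the three list.remove calls.
import Mathlib
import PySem

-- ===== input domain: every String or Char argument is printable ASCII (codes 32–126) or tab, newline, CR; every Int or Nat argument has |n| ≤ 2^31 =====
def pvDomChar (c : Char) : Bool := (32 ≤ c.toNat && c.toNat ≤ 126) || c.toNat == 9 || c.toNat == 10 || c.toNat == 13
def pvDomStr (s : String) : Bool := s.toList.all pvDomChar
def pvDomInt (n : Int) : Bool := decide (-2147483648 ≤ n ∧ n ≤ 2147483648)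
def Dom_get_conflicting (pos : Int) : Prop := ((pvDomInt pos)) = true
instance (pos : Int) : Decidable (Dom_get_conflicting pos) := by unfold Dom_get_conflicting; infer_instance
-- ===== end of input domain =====

-- B replaces A's nine-candidate box-start search and list.remove calls by closed-form
-- arithmetic and filtered range comprehensions (objective: simpler).

-- ===== PORT A =====
-- the for/break search over the nine chunk starts; [] = loop ends with `chunk` unbound
-- (only reachable outside Pre_, where A raises)
def pvChunkLoop (positions : List Int) (pos : Int) : List Int → List Int
  | [] => []
  | s :: rest =>
    let cp := PySem.List.slice positions (some s) (some (s + 3))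
              ++ PySem.List.slice positions (some (s + 9)) (some (s + 12))
              ++ PySem.List.slice positions (some (s + 18)) (some (s + 21))
    if pos ∈ cp then cp else pvChunkLoop positions pos rest

def get_conflicting (pos : Int) : List (String × List Int) :=
  let positions : List Int := PySem.List.pyRange 0 81 1
  let vertical := (PySem.List.slice? positions (some (PySem.Int.mod pos 9)) none 9).getD []
  let horizontal := PySem.List.slice positions (some (PySem.Int.floordiv pos 9 * 9))
                      (some (PySem.Int.floordiv pos 9 * 9 + 9))
  let chunk := pvChunkLoop positions pos [0, 3, 6, 27, 30, 33, 54, 57, 60]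
  -- .remove(pos): none = ValueError, excluded by Pre_; dummy [] is unreachable inside Pre_
  let vertical := (PySem.List.remove? vertical pos).getD []
  let horizontal := (PySem.List.remove? horizontal pos).getD []
  let chunk := (PySem.List.remove? chunk pos).getD []
  [("v", vertical), ("h", horizontal), ("c", chunk)]

-- ===== PORT B =====
def get_conflicting_alt (pos : Int) : List (String × List Int) :=
  let row := PySem.Int.floordiv pos 9
  let col := PySem.Int.mod pos 9
  let box := PySem.Int.floordiv pos 27 * 27 + PySem.Int.floordiv col 3 * 3
  let vertical := (PySem.List.pyRange col 81 9).filter (fun i => i ≠ pos)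
  let horizontal := (PySem.List.pyRange (row * 9) (row * 9 + 9) 1).filter (fun i => i ≠ pos)
  let chunk := ((PySem.List.pyRange 0 3 1).flatMap (fun r =>
      (PySem.List.pyRange 0 3 1).map (fun c => box + 9 * r + c))).filter (fun i => i ≠ pos)
  [("v", vertical), ("h", horizontal), ("c", chunk)]

-- ===== PRECONDITION & SPEC =====
-- Pre_ excludes exactly the positions outside the 9x9 board, on which A raises
-- ValueError at vertical.remove(pos).
def Pre_get_conflicting (pos : Int) : Prop := 0 ≤ pos ∧ pos < 81
instance (pos : Int) : Decidable (Pre_get_conflicting pos) := by unfold Pre_get_conflicting; infer_instance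
def pvWitness_get_conflicting : Int := (40)
def Spec_get_conflicting (pos : Int) (out : List (String × List Int)) : Prop := out = get_conflicting_alt pos
instance (pos : Int) (out : List (String × List Int)) : Decidable (Spec_get_conflicting pos out) := by unfold Spec_get_conflicting; infer_instance

-- ===== CLAIM (what is proved, stated in full; the proofs are below) =====
def Claim_equal_get_conflicting : Prop := ∀ (pos : Int), Dom_get_conflicting pos → Pre_get_conflicting pos → Spec_get_conflicting pos (get_conflicting pos)

-- ===== LEMMAS AND PROOFS =====
theorem pv_all81 : (List.range 81).all
    (fun n => get_conflicting (n : Int) == get_conflicting_alt (n : Int)) = true := by decide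

-- ===== VERDICT (by name: the statement is the Claim_ definition above) =====
theorem get_conflicting_spec : Claim_equal_get_conflicting := by
  intro pos _ hpre
  have h0 : 0 ≤ pos := hpre.1
  have h1 : pos < 81 := hpre.2
  have hn : pos = (pos.toNat : Int) := (Int.toNat_of_nonneg h0).symm
  have hlt : pos.toNat < 81 := by omega
  have := List.all_eq_true.mp pv_all81 pos.toNat (List.mem_range.mpr hlt)
  unfold Spec_get_conflicting
  rw [hn]
  exact eq_of_beq this
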